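-- pv_equiv track=rewrite | github.com/hyunmoon-han/SQL_SORT | original.py | first_replace
-- ===== SOURCE A (Python) =====
-- def first_replace(sql):
--     # 여는 괄호 '(' 위치를 찾기
--     open_index = -1
--     close_index = -1
--
--     # 여는 괄호 위치 찾기
--     for i, char in enumerate(sql):
--         if char == '(':
--             open_index = i
--             break  # 첫 번째 여는 괄호만 찾으면 종료
--
--     if open_index != -1:
--         # 여는 괄호 '('를 <-로 치환
--         sql = sql[:open_index] + '<- ' + sql[open_index + 1:]
--
--         # 닫는 괄호 ')'를 찾기 (여는 괄호 이후로)
--         open_count = 1  # 여는 괄호를 찾았으므로 1로 시작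
--         for i in range(open_index + 1, len(sql)):
--             if sql[i] == '(':
--                 open_count += 1
--             elif sql[i] == ')':
--                 open_count -= 1
--             if open_count == 0:
--                 close_index = i
--                 break
--
--         if close_index != -1:
--             # 닫는 괄호 ')'를 ->로 치환
--             sql = sql[:close_index] + ' >-' + sql[close_index + 1:]
--
--     return sql
-- ===== SOURCE B (Python) =====
-- def first_replace(sql):
--     # Candidate-testing algorithm: walk the ')' occurrences with str.find and
--     # accept the first one whose interior slice has balanced counts of '(' and ')'
--     # (tested by recounting with str.count); no running depth counter.
--     o = sql.find('(')
--     if o == -1: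
--         return sql
--     j = sql.find(')', o + 1)
--     while j != -1 and sql[o + 1:j].count('(') != sql[o + 1:j].count(')'):
--         j = sql.find(')', j + 1)
--     if j == -1:
--         return sql[:o] + '<- ' + sql[o + 1:]
--     return sql[:o] + '<- ' + sql[o + 1:j] + ' >-' + sql[j + 1:]
-- ===== Notes on version B (the rewrite author's own statement) =====
-- stated objective: alternative
-- what changed: A keeps a running depth counter while scanning a string it has already mutated by splicing in the open marker; B keeps no depth state at all: it walks the close-paren occurrences of the original string with str.find and accepts the first candidate whose interior slice has equal counts of the two parens (recounted from scratch with str.count), then builds the result in one expression from the two indices.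
import Mathlib
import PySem

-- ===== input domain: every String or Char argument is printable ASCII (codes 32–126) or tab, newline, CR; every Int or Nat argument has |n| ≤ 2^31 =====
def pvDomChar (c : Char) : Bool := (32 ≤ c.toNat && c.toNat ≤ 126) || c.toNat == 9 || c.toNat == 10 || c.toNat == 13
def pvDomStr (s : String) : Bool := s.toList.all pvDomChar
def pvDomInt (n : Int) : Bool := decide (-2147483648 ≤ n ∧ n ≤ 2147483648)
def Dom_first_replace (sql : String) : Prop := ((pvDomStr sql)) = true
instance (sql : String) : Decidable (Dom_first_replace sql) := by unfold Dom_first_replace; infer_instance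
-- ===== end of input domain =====

-- B replaces A's running depth counter over a mutated string by candidate testing:
-- it walks the ')' occurrences of the ORIGINAL string with find and accepts the first
-- whose interior slice has equal counts of '(' and ')' (objective: alternative algorithm).

-- ===== PORT A =====
-- A's first loop: 'for i, char in enumerate(sql): if char == '(': open_index = i; break'
def aOpenLoop : List Char → Nat → Int
  | [], _ => -1
  | c :: cs, i => if c = '(' then (i : Int) else aOpenLoop cs (i + 1)

-- A's second loop over the MUTATED string: 'for i in range(open_index+1, len(sql)): …'
def aCloseLoop (s : List Char) (i : Nat) (cnt : Int) : Int :=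
  if h : i < s.length then
    let cnt' := if s[i] = '(' then cnt + 1 else if s[i] = ')' then cnt - 1 else cnt
    if cnt' = 0 then (i : Int) else aCloseLoop s (i + 1) cnt'
  else -1
termination_by s.length - i

def first_replace (sql : String) : String :=
  let cs := sql.toList
  let openIndex := aOpenLoop cs 0
  if openIndex ≠ -1 then
    -- sql = sql[:open_index] + '<- ' + sql[open_index+1:]
    let cs2 := PySem.List.slice cs none (some openIndex) ++ "<- ".toList
                 ++ PySem.List.slice cs (some (openIndex + 1)) none
    let closeIndex := aCloseLoop cs2 (openIndex.toNat + 1) 1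
    if closeIndex ≠ -1 then
      String.ofList (PySem.List.slice cs2 none (some closeIndex) ++ " >-".toList
                      ++ PySem.List.slice cs2 (some (closeIndex + 1)) none)
    else String.ofList cs2
  else sql

-- ===== PORT B =====
-- Source B's while loop: 'while j != -1 and sql[o+1:j].count('(') != sql[o+1:j].count(')'):
--   j = sql.find(')', j + 1)'.  A single-character str.count is exactly List.count on the
-- slice's code points.  The dite guard only makes the recursion total: Python continues
-- exactly when find returns ≠ -1, i.e. a valid index > j.
def bCloseLoop (cs : List Char) (o : Nat) (j : Nat) : Int :=
  if (PySem.List.slice cs (some ((o : Int) + 1)) (some ((j : Nat) : Int))).count '(' ≠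
     (PySem.List.slice cs (some ((o : Int) + 1)) (some ((j : Nat) : Int))).count ')' then
    let j' := PySem.Chars.findFrom cs [')'] ((j : Nat) + 1) none
    if h : j < j'.toNat ∧ j'.toNat ≤ cs.length then bCloseLoop cs o j'.toNat else -1
  else (j : Int)
termination_by cs.length - j
decreasing_by omega

def first_replace_alt (sql : String) : String :=
  let cs := sql.toList
  let o := PySem.Chars.find cs ['(']
  if o = -1 then sql
  else
    let j0 := PySem.Chars.findFrom cs [')'] (o + 1) none
    let j := if j0 = -1 then (-1 : Int) else bCloseLoop cs o.toNat j0.toNat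
    if j = -1 then
      String.ofList (PySem.List.slice cs none (some o) ++ "<- ".toList
                      ++ PySem.List.slice cs (some (o + 1)) none)
    else
      String.ofList (PySem.List.slice cs none (some o) ++ "<- ".toList
                      ++ PySem.List.slice cs (some (o + 1)) (some j) ++ " >-".toList
                      ++ PySem.List.slice cs (some (j + 1)) none)

-- ===== PRECONDITION & SPEC =====
def Spec_first_replace (sql : String) (out : String) : Prop := out = first_replace_alt sql
instance (sql : String) (out : String) : Decidable (Spec_first_replace sql out) := by unfold Spec_first_replace; infer_instance

-- ===== CLAIM (what is proved, stated in full; the proofs are below) =====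
def Claim_equal_first_replace : Prop := ∀ (sql : String), Dom_first_replace sql → Spec_first_replace sql (first_replace sql)

-- ===== LEMMAS AND PROOFS =====

-- the depth scan A's close loop computes (relative index where depth hits 0)
def depthScan : List Char → Int → Option Nat
  | [], _ => none
  | c :: cs, d =>
    if c = '(' then (depthScan cs (d + 1)).map (· + 1)
    else if c = ')' then
      if d - 1 = 0 then some 0 else (depthScan cs (d - 1)).map (· + 1)
    else (depthScan cs d).map (· + 1)

theorem depthScan_lt {cs : List Char} {d : Int} {j : Nat}
    (h : depthScan cs d = some j) : j < cs.length := by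
  induction cs generalizing d j with
  | nil => simp [depthScan] at h
  | cons c cs ih =>
    simp only [depthScan] at h
    split_ifs at h with h1 h2 h3
    · obtain ⟨j', hj', rfl⟩ := Option.map_eq_some_iff.mp h
      exact Nat.succ_lt_succ (ih hj')
    · simp only [Option.some.injEq] at h; subst h; simp
    · obtain ⟨j', hj', rfl⟩ := Option.map_eq_some_iff.mp h
      exact Nat.succ_lt_succ (ih hj')
    · obtain ⟨j', hj', rfl⟩ := Option.map_eq_some_iff.mp h
      exact Nat.succ_lt_succ (ih hj')

theorem aOpenLoop_eq (cs : List Char) (i : Nat) :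
    aOpenLoop cs i = match cs.idxOf? '(' with
      | none => -1
      | some k => ((i + k : Nat) : Int) := by
  induction cs generalizing i with
  | nil => simp [aOpenLoop, List.idxOf?]
  | cons c cs ih =>
    by_cases hc : c = '('
    · simp [aOpenLoop, List.idxOf?_cons, hc]
    · rw [aOpenLoop, if_neg hc, ih]
      simp only [List.idxOf?_cons, beq_iff_eq, if_neg hc]
      cases h : cs.idxOf? '(' with
      | none => simp
      | some k => simp; ring

theorem aCloseLoop_eq (s : List Char) (i : Nat) (d : Int) (hd : 1 ≤ d) :
    aCloseLoop s i d = match depthScan (s.drop i) d with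
      | none => -1
      | some j => ((i + j : Nat) : Int) := by
  by_cases h : i < s.length
  · rw [aCloseLoop, dif_pos h]
    have hdrop : s.drop i = s[i] :: s.drop (i + 1) := List.drop_eq_getElem_cons h
    rw [hdrop]
    by_cases h1 : s[i] = '('
    · simp only [depthScan, if_pos h1]
      rw [if_neg (by omega : ¬ (d + 1 = 0)), aCloseLoop_eq s (i+1) (d+1) (by omega)]
      cases h4 : depthScan (s.drop (i+1)) (d+1) with
      | none => simp
      | some j => simp; ring
    · by_cases h2 : s[i] = ')'
      · simp only [depthScan, if_neg h1, if_pos h2]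
        by_cases h3 : d - 1 = 0
        · simp [h3]
        · simp only [if_neg h3]
          rw [aCloseLoop_eq s (i+1) (d-1) (by omega)]
          cases h4 : depthScan (s.drop (i+1)) (d-1) with
          | none => simp
          | some j => simp; ring
      · simp only [depthScan, if_neg h1, if_neg h2]
        rw [if_neg (by omega : ¬ (d = 0)), aCloseLoop_eq s (i+1) d hd]
        cases h4 : depthScan (s.drop (i+1)) d with
        | none => simp
        | some j => simp; ring
  · rw [aCloseLoop, dif_neg h, List.drop_eq_nil_of_le (by omega)]
    rfl
termination_by s.length - i

-- the match property both programs look for, relative to the text after the '('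
def qbd (s : List Char) (d : Int) (r : Nat) : Prop :=
  s.getD r ' ' = ')' ∧ (((s.take r).count ')' : Int) + 1 = ((s.take r).count '(' : Int) + d)

theorem qbd_lt {s : List Char} {d : Int} {r : Nat} (h : qbd s d r) : r < s.length := by
  by_contra hge
  have h1 := h.1
  rw [List.getD_eq_default s ' ' (by omega)] at h1
  exact absurd h1 (by decide)

theorem qbd_zero (c : Char) (t : List Char) (d : Int) :
    qbd (c :: t) d 0 ↔ (c = ')' ∧ d = 1) := by
  unfold qbd
  simp only [List.getD_cons_zero, List.take_zero, List.count_nil]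
  constructor <;> rintro ⟨a, b⟩ <;> exact ⟨a, by omega⟩

theorem qbd_cons (c : Char) (t : List Char) (d : Int) (r : Nat) :
    qbd (c :: t) d (r + 1) ↔
      qbd t (if c = '(' then d + 1 else if c = ')' then d - 1 else d) r := by
  unfold qbd
  simp only [List.getD_cons_succ, List.take_succ_cons, List.count_cons, beq_iff_eq]
  constructor <;> rintro ⟨a, b⟩ <;> refine ⟨a, ?_⟩ <;>
    split_ifs at b ⊢ <;> simp_all <;> push_cast at b ⊢ <;> omega

theorem depthScan_some (s : List Char) : ∀ (d : Int), 1 ≤ d → ∀ r,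
    depthScan s d = some r → qbd s d r ∧ ∀ r' < r, ¬ qbd s d r' := by
  induction s with
  | nil => intro d hd r h; simp [depthScan] at h
  | cons c t ih =>
    intro d hd r h
    simp only [depthScan] at h
    by_cases h1 : c = '('
    · rw [if_pos h1] at h
      obtain ⟨r0, hr0, rfl⟩ := Option.map_eq_some_iff.mp h
      obtain ⟨hq, hmin⟩ := ih (d + 1) (by omega) r0 hr0
      refine ⟨(qbd_cons c t d r0).mpr (by rw [if_pos h1]; exact hq), ?_⟩
      intro r' hr'
      match r' with
      | 0 => rw [qbd_zero]; rintro ⟨hc, -⟩; rw [h1] at hc; exact absurd hc (by decide)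
      | r'' + 1 =>
        rw [qbd_cons, if_pos h1]
        exact hmin r'' (by omega)
    · rw [if_neg h1] at h
      by_cases h2 : c = ')'
      · rw [if_pos h2] at h
        by_cases h3 : d - 1 = 0
        · rw [if_pos h3] at h
          obtain rfl : (0 : Nat) = r := by simpa using h
          exact ⟨(qbd_zero c t d).mpr ⟨h2, by omega⟩, by omega⟩
        · rw [if_neg h3] at h
          obtain ⟨r0, hr0, rfl⟩ := Option.map_eq_some_iff.mp h
          obtain ⟨hq, hmin⟩ := ih (d - 1) (by omega) r0 hr0
          refine ⟨(qbd_cons c t d r0).mpr (by rw [if_neg h1, if_pos h2]; exact hq), ?_⟩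
          intro r' hr'
          match r' with
          | 0 => rw [qbd_zero]; rintro ⟨-, hd1⟩; omega
          | r'' + 1 =>
            rw [qbd_cons, if_neg h1, if_pos h2]
            exact hmin r'' (by omega)
      · rw [if_neg h2] at h
        obtain ⟨r0, hr0, rfl⟩ := Option.map_eq_some_iff.mp h
        obtain ⟨hq, hmin⟩ := ih d hd r0 hr0
        refine ⟨(qbd_cons c t d r0).mpr (by rw [if_neg h1, if_neg h2]; exact hq), ?_⟩
        intro r' hr'
        match r' with
        | 0 => rw [qbd_zero]; rintro ⟨hc, -⟩; exact h2 hc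
        | r'' + 1 =>
          rw [qbd_cons, if_neg h1, if_neg h2]
          exact hmin r'' (by omega)

theorem depthScan_none (s : List Char) : ∀ (d : Int), 1 ≤ d →
    depthScan s d = none → ∀ r, ¬ qbd s d r := by
  induction s with
  | nil =>
    intro d _ _ r h
    exact absurd ((List.getD_eq_default [] ' ' (by simp)) ▸ h.1) (by decide)
  | cons c t ih =>
    intro d hd h r
    simp only [depthScan] at h
    by_cases h1 : c = '('
    · rw [if_pos h1] at h
      have ht := ih (d + 1) (by omega) (Option.map_eq_none_iff.mp h)
      match r with
      | 0 => rw [qbd_zero]; rintro ⟨hc, -⟩; rw [h1] at hc; exact absurd hc (by decide)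
      | r'' + 1 => rw [qbd_cons, if_pos h1]; exact ht r''
    · rw [if_neg h1] at h
      by_cases h2 : c = ')'
      · rw [if_pos h2] at h
        by_cases h3 : d - 1 = 0
        · rw [if_pos h3] at h; exact absurd h (by simp)
        · rw [if_neg h3] at h
          have ht := ih (d - 1) (by omega) (Option.map_eq_none_iff.mp h)
          match r with
          | 0 => rw [qbd_zero]; rintro ⟨-, hd1⟩; omega
          | r'' + 1 => rw [qbd_cons, if_neg h1, if_pos h2]; exact ht r''
      · rw [if_neg h2] at h
        have ht := ih d hd (Option.map_eq_none_iff.mp h)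
        match r with
        | 0 => rw [qbd_zero]; rintro ⟨hc, -⟩; exact h2 hc
        | r'' + 1 => rw [qbd_cons, if_neg h1, if_neg h2]; exact ht r''

-- a one-character pattern is a prefix of 'drop i' iff that character sits at index i
theorem char_prefix_iff (x : List Char) (c : Char) (i : Nat) :
    [c] <+: x.drop i ↔ (i < x.length ∧ x.getD i ' ' = c) := by
  by_cases h : i < x.length
  · rw [List.drop_eq_getElem_cons h]
    constructor
    · intro hp
      obtain ⟨hc, -⟩ := List.cons_prefix_cons.mp hp
      exact ⟨h, by rw [List.getD_eq_getElem x ' ' h, ← hc]⟩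
    · rintro ⟨-, hg⟩
      rw [List.getD_eq_getElem x ' ' h] at hg
      exact List.cons_prefix_cons.mpr ⟨hg.symm, List.nil_prefix⟩
  · rw [List.drop_eq_nil_of_le (by omega)]
    simp only [List.prefix_nil]
    constructor
    · intro hp; exact absurd hp (by simp)
    · rintro ⟨hi, -⟩; omega

theorem getD_drop (cs : List Char) (k r : Nat) :
    (cs.drop k).getD r ' ' = cs.getD (k + r) ' ' := by
  simp [List.getD_eq_getElem?_getD, List.getElem?_drop]

-- the slice Source B counts over is a take of the text after the '('
theorem slice_take (cs : List Char) (o j : Nat) :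
    PySem.List.slice cs (some ((o : Int) + 1)) (some ((j : Nat) : Int))
      = (cs.drop (o + 1)).take (j - (o + 1)) := by
  rw [show ((o : Int) + 1) = (((o + 1 : Nat) : Int)) from by push_cast; ring,
    PySem.List.slice_natCast]

-- B's candidate loop returns -1 when no match index exists
theorem bClose_none (cs : List Char) (o : Nat)
    (hnone : ∀ r, ¬ qbd (cs.drop (o + 1)) 1 r) :
    ∀ n j, cs.length - j ≤ n → o + 1 ≤ j → j < cs.length → cs.getD j ' ' = ')' →
      bCloseLoop cs o j = -1 := by
  intro n
  induction n with
  | zero => intro j hn hj hjl _; omega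
  | succ n ih =>
    intro j hn hj hjl hjc
    rw [bCloseLoop, slice_take]
    have hq := hnone (j - (o + 1))
    unfold qbd at hq
    rw [getD_drop, show o + 1 + (j - (o + 1)) = j from by omega] at hq
    have hcnt : ((cs.drop (o + 1)).take (j - (o + 1))).count '(' ≠
        ((cs.drop (o + 1)).take (j - (o + 1))).count ')' := by
      intro he; exact hq ⟨hjc, by omega⟩
    rw [if_pos hcnt]
    by_cases hf : PySem.Chars.findFrom cs [')'] ((j : Nat) + 1) none = -1
    · rw [hf]; simp
    · have hc1 : ((j : Nat) + 1 : Int) = (((j + 1 : Nat) : Int)) := by push_cast; ring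
      rw [hc1] at hf ⊢
      obtain ⟨hge, hpre, -⟩ :=
        PySem.Chars.findFrom_natCast_spec cs [')'] (j + 1) (by omega) hf
      obtain ⟨hlt, hcl⟩ := (char_prefix_iff cs ')' _).mp hpre
      have hguard : j < (PySem.Chars.findFrom cs [')'] ((j + 1 : Nat) : Int) none).toNat ∧
          (PySem.Chars.findFrom cs [')'] ((j + 1 : Nat) : Int) none).toNat ≤ cs.length := by
        omega
      rw [dif_pos hguard]
      exact ih _ (by omega) (by omega) hlt hcl

-- B's candidate loop finds the minimal match index
theorem bClose_some (cs : List Char) (o : Nat) (r : Nat)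
    (hr : qbd (cs.drop (o + 1)) 1 r) (hmin : ∀ r' < r, ¬ qbd (cs.drop (o + 1)) 1 r') :
    ∀ n j, (o + 1 + r) - j ≤ n → o + 1 ≤ j → j ≤ o + 1 + r → cs.getD j ' ' = ')' →
      (∀ i, o + 1 ≤ i → i < j → ¬ qbd (cs.drop (o + 1)) 1 (i - (o + 1))) →
      bCloseLoop cs o j = ((o + 1 + r : Nat) : Int) := by
  have hrlen : o + 1 + r < cs.length := by
    have := qbd_lt hr
    rw [List.length_drop] at this
    omega
  have hrc : cs.getD (o + 1 + r) ' ' = ')' := by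
    have := hr.1
    rwa [getD_drop] at this
  intro n
  induction n with
  | zero =>
    intro j hn hj hjr hjc _
    have hjeq : j = o + 1 + r := by omega
    have hceq : ((cs.drop (o + 1)).take (j - (o + 1))).count '(' =
        ((cs.drop (o + 1)).take (j - (o + 1))).count ')' := by
      rw [show j - (o + 1) = r from by omega]
      have := hr.2
      omega
    rw [bCloseLoop, slice_take, if_neg (not_not_intro hceq), hjeq]
  | succ n ih =>
    intro j hn hj hjr hjc hgap
    rw [bCloseLoop, slice_take]
    by_cases hcnt : ((cs.drop (o + 1)).take (j - (o + 1))).count '(' =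
        ((cs.drop (o + 1)).take (j - (o + 1))).count ')'
    · -- counts balance: this candidate is the match, so j = o+1+r
      have hqj : qbd (cs.drop (o + 1)) 1 (j - (o + 1)) :=
        ⟨by rw [getD_drop, show o + 1 + (j - (o + 1)) = j from by omega]; exact hjc,
         by omega⟩
      have : ¬ (j - (o + 1) < r) := fun hlt => hmin _ hlt hqj
      have hjeq : j = o + 1 + r := by omega
      rw [if_neg (not_not_intro hcnt), hjeq]
    · -- counts differ: j < o+1+r, advance to the next ')'
      have hqjn : ¬ qbd (cs.drop (o + 1)) 1 (j - (o + 1)) := by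
        rintro ⟨-, he⟩; exact hcnt (by omega)
      have hjlt : j < o + 1 + r := by
        by_contra hge2
        apply hqjn
        refine ⟨by rw [getD_drop, show o + 1 + (j - (o + 1)) = j from by omega]; exact hjc, ?_⟩
        rw [show j - (o + 1) = r from by omega]
        exact hr.2
      rw [if_pos hcnt]
      have hc1 : ((j : Nat) + 1 : Int) = (((j + 1 : Nat) : Int)) := by push_cast; ring
      rw [hc1]
      -- the matching ')' at o+1+r lies at an index ≥ j+1, so find succeeds
      have hinfix : [')'] <:+: cs.drop (j + 1) := by
        have hpref : [')'] <+: cs.drop (o + 1 + r) :=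
          (char_prefix_iff cs ')' _).mpr ⟨hrlen, hrc⟩
        have hdd : cs.drop (o + 1 + r) = (cs.drop (j + 1)).drop ((o + 1 + r) - (j + 1)) := by
          rw [List.drop_drop]
          congr 1
          omega
        rw [hdd] at hpref
        exact hpref.isInfix.trans (List.drop_suffix _ _).isInfix
      have hf : PySem.Chars.findFrom cs [')'] ((j + 1 : Nat) : Int) none ≠ -1 := by
        intro heq
        exact ((PySem.Chars.findFrom_natCast_eq_neg_one_iff cs [')'] (j + 1) (by omega)).mp heq)
          hinfix
      obtain ⟨hge, hpre, hmg⟩ :=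
        PySem.Chars.findFrom_natCast_spec cs [')'] (j + 1) (by omega) hf
      set j' := PySem.Chars.findFrom cs [')'] ((j + 1 : Nat) : Int) none with hj'def
      obtain ⟨hlt, hcl⟩ := (char_prefix_iff cs ')' _).mp hpre
      have hj'le : j'.toNat ≤ o + 1 + r := by
        by_contra hgt
        exact hmg (o + 1 + r) (by omega) (by omega)
          ((char_prefix_iff cs ')' _).mpr ⟨hrlen, hrc⟩)
      have hguard : j < j'.toNat ∧ j'.toNat ≤ cs.length := by omega
      rw [dif_pos hguard]
      refine ih j'.toNat (by omega) (by omega) hj'le hcl ?_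
      intro i hio hij'
      rcases Nat.lt_or_ge i j with hlt2 | hge2
      · exact hgap i hio hlt2
      · rcases Nat.eq_or_lt_of_le hge2 with rfl | hgt2
        · exact hqjn
        · -- between j and j' there is no ')'
          intro hq
          have hilen := qbd_lt hq
          rw [List.length_drop] at hilen
          have hic : cs.getD i ' ' = ')' := by
            have := hq.1
            rwa [getD_drop, show o + 1 + (i - (o + 1)) = i from by omega] at this
          exact hmg i (by omega) hij'
            ((char_prefix_iff cs ')' _).mpr ⟨by omega, hic⟩)

-- the whole close computation of B, expressed through depthScan like A's
theorem bClose_match (cs : List Char) (o : Nat) (ho : o < cs.length) :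
    (if PySem.Chars.findFrom cs [')'] (((o : Nat) : Int) + 1) none = -1 then (-1 : Int)
     else bCloseLoop cs o (PySem.Chars.findFrom cs [')'] (((o : Nat) : Int) + 1) none).toNat)
    = match depthScan (cs.drop (o + 1)) 1 with
      | none => -1
      | some r => ((o + 1 + r : Nat) : Int) := by
  have hc1 : (((o : Nat) : Int) + 1) = (((o + 1 : Nat) : Int)) := by push_cast; ring
  rw [hc1]
  cases hds : depthScan (cs.drop (o + 1)) 1 with
  | none =>
    have hnone := depthScan_none (cs.drop (o + 1)) 1 (le_refl 1) hds
    by_cases hf : PySem.Chars.findFrom cs [')'] ((o + 1 : Nat) : Int) none = -1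
    · rw [if_pos hf]
    · rw [if_neg hf]
      obtain ⟨hge, hpre, -⟩ :=
        PySem.Chars.findFrom_natCast_spec cs [')'] (o + 1) (by omega) hf
      obtain ⟨hlt, hcl⟩ := (char_prefix_iff cs ')' _).mp hpre
      exact bClose_none cs o hnone cs.length _ (by omega) (by omega) hlt hcl
  | some r =>
    obtain ⟨hr, hmin⟩ := depthScan_some (cs.drop (o + 1)) 1 (le_refl 1) r hds
    have hrlen : o + 1 + r < cs.length := by
      have := qbd_lt hr
      rw [List.length_drop] at this
      omega
    have hrc : cs.getD (o + 1 + r) ' ' = ')' := by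
      have := hr.1
      rwa [getD_drop] at this
    have hf : PySem.Chars.findFrom cs [')'] ((o + 1 : Nat) : Int) none ≠ -1 := by
      intro heq
      apply (PySem.Chars.findFrom_natCast_eq_neg_one_iff cs [')'] (o + 1) (by omega)).mp heq
      have hpref : [')'] <+: cs.drop (o + 1 + r) :=
        (char_prefix_iff cs ')' _).mpr ⟨hrlen, hrc⟩
      have hdd : cs.drop (o + 1 + r) = (cs.drop (o + 1)).drop r := by
        rw [List.drop_drop]
      rw [hdd] at hpref
      exact hpref.isInfix.trans (List.drop_suffix _ _).isInfix
    rw [if_neg hf]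
    obtain ⟨hge, hpre, hmg⟩ :=
      PySem.Chars.findFrom_natCast_spec cs [')'] (o + 1) (by omega) hf
    set j0 := PySem.Chars.findFrom cs [')'] ((o + 1 : Nat) : Int) none with hj0def
    obtain ⟨hlt, hcl⟩ := (char_prefix_iff cs ')' _).mp hpre
    have hj0le : j0.toNat ≤ o + 1 + r := by
      by_contra hgt
      exact hmg (o + 1 + r) (by omega) (by omega)
        ((char_prefix_iff cs ')' _).mpr ⟨hrlen, hrc⟩)
    refine bClose_some cs o r hr hmin (o + 1 + r) j0.toNat (by omega) (by omega) hj0le hcl ?_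
    intro i hio hij0
    intro hq
    have hilen := qbd_lt hq
    rw [List.length_drop] at hilen
    have hic : cs.getD i ' ' = ')' := by
      have := hq.1
      rwa [getD_drop, show o + 1 + (i - (o + 1)) = i from by omega] at this
    exact hmg i (by omega) hij0 ((char_prefix_iff cs ')' _).mpr ⟨by omega, hic⟩)

-- sql.find('(') expressed through idxOf?
theorem find_open (cs : List Char) :
    PySem.Chars.find cs ['('] = match cs.idxOf? '(' with
      | none => -1
      | some k => ((k : Nat) : Int) := by
  cases hk : cs.idxOf? '(' with
  | none =>
    have hmem : '(' ∉ cs := List.idxOf?_eq_none_iff.mp hk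
    rw [PySem.Chars.find_eq_neg_one_iff]
    intro hinf
    exact hmem (hinf.subset (by simp))
  | some k =>
    obtain ⟨hklen, hke, hkmin⟩ := List.idxOf?_eq_some_iff.mp hk
    have hkD : cs.getD k ' ' = '(' := by rw [List.getD_eq_getElem cs ' ' hklen]; exact hke
    have hinf : ['('] <:+: cs := by
      have hpref : ['('] <+: cs.drop k := (char_prefix_iff cs '(' k).mpr ⟨hklen, hkD⟩
      exact hpref.isInfix.trans (List.drop_suffix _ _).isInfix
    have hnn : 0 ≤ PySem.Chars.find cs ['('] :=
      (PySem.Chars.find_nonneg_iff cs ['(']).mpr hinf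
    obtain ⟨hpre, hmin⟩ := PySem.Chars.find_spec (s := cs) (sub := ['(']) hnn
    obtain ⟨hflen, hfc⟩ := (char_prefix_iff cs '(' _).mp hpre
    have heq : (PySem.Chars.find cs ['(']).toNat = k := by
      rcases Nat.lt_trichotomy (PySem.Chars.find cs ['(']).toNat k with h | h | h
      · exfalso
        apply hkmin _ h
        rw [← List.getD_eq_getElem cs ' ' hflen]
        exact hfc
      · exact h
      · exact absurd ((char_prefix_iff cs '(' k).mpr ⟨hklen, hkD⟩) (hmin k h)
    show PySem.Chars.find cs ['('] = ((k : Nat) : Int)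
    omega

theorem take_len (cs : List Char) (k : Nat) (hk : k ≤ cs.length) :
    (cs.take k).length = k := by simp [hk]

-- ===== VERDICT (by name: the statement is the Claim_ definition above) =====
theorem first_replace_spec : Claim_equal_first_replace := by
  intro sql _
  unfold Spec_first_replace
  simp only [first_replace, first_replace_alt, aOpenLoop_eq, find_open]
  cases h : sql.toList.idxOf? '(' with
  | none => simp
  | some k =>
    obtain ⟨hk, hck, -⟩ := List.idxOf?_eq_some_iff.mp h
    have hk' : k ≤ sql.toList.length := le_of_lt hk
    have htl : (sql.toList.take k).length = k := take_len _ _ hk'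
    have hne : ((0 + k : Nat) : Int) ≠ -1 := by omega
    simp only [Nat.zero_add] at hne ⊢
    rw [if_pos (by simpa using hne), if_neg (by omega : ¬ ((k : Nat) : Int) = -1)]
    have hKtoNat : ((k : Nat) : Int).toNat = k := by omega
    rw [hKtoNat, bClose_match sql.toList k hk]
    have hch : "<- ".toList = ['<', '-', ' '] := by decide
    have hs1 : PySem.List.slice sql.toList none (some ((k : Nat) : Int)) = sql.toList.take k :=
      PySem.List.slice_to_natCast sql.toList k
    have hs2 : PySem.List.slice sql.toList (some (((k : Nat) : Int) + 1)) none
        = sql.toList.drop (k + 1) := by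
      rw [show ((k : Nat) : Int) + 1 = (((k + 1 : Nat) : Int)) from by push_cast; ring]
      exact PySem.List.slice_from_natCast sql.toList (k + 1)
    rw [hs1, hs2, hch]
    have hdropm : ((sql.toList.take k ++ ['<', '-', ' '] ++ sql.toList.drop (k + 1)).drop (k + 1))
        = '-' :: ' ' :: sql.toList.drop (k + 1) := by
      rw [List.append_assoc, show k + 1 = (sql.toList.take k).length + 1 from by rw [htl],
        List.drop_length_add_append]
      rfl
    rw [aCloseLoop_eq _ (k + 1) 1 (le_refl 1), hdropm]
    have hds : depthScan ('-' :: ' ' :: sql.toList.drop (k + 1)) 1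
        = (depthScan (sql.toList.drop (k + 1)) 1).map (· + 2) := by
      simp [depthScan]
    rw [hds]
    cases h4 : depthScan (sql.toList.drop (k + 1)) 1 with
    | none =>
      simp only [Option.map_none]
      simp
    | some j =>
      have hj : j < (sql.toList.drop (k + 1)).length := depthScan_lt h4
      simp only [Option.map_some]
      have hb2 : PySem.List.slice sql.toList (some (((k : Nat) : Int) + 1))
          (some ((k + 1 + j : Nat) : Int)) = (sql.toList.drop (k + 1)).take j := by
        rw [show ((k : Nat) : Int) + 1 = (((k + 1 : Nat) : Int)) from by push_cast; ring,
          PySem.List.slice_natCast]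
        congr 1
        omega
      have hb3 : PySem.List.slice sql.toList (some (((k + 1 + j : Nat) : Int) + 1)) none
          = (sql.toList.drop (k + 1)).drop (j + 1) := by
        rw [show ((k + 1 + j : Nat) : Int) + 1 = (((k + 1 + j + 1 : Nat) : Int)) from by push_cast; ring,
          PySem.List.slice_from_natCast, List.drop_drop]
        congr 1
      have ha1 : PySem.List.slice
          (sql.toList.take k ++ ['<', '-', ' '] ++ sql.toList.drop (k + 1)) none
          (some ((k + 1 + (j + 2) : Nat) : Int))
          = sql.toList.take k ++ ['<', '-', ' '] ++ (sql.toList.drop (k + 1)).take j := by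
        rw [PySem.List.slice_to_natCast, List.append_assoc,
          show k + 1 + (j + 2) = (sql.toList.take k).length + (3 + j) from by omega,
          List.take_length_add_append,
          show 3 + j = j + 1 + 1 + 1 from by omega]
        simp [List.take_succ_cons]
      have ha2 : PySem.List.slice
          (sql.toList.take k ++ ['<', '-', ' '] ++ sql.toList.drop (k + 1))
          (some (((k + 1 + (j + 2) : Nat) : Int) + 1)) none
          = (sql.toList.drop (k + 1)).drop (j + 1) := by
        rw [show ((k + 1 + (j + 2) : Nat) : Int) + 1 = (((k + 1 + (j + 2) + 1 : Nat) : Int)) from by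
            push_cast; ring,
          PySem.List.slice_from_natCast, List.append_assoc,
          show k + 1 + (j + 2) + 1 = (sql.toList.take k).length + (j + 1 + 1 + 1 + 1) from by omega,
          List.drop_length_add_append]
        simp [List.drop_succ_cons]
      rw [ha1, ha2, hb2, hb3,
        if_pos (by push_cast; omega : (((k + 1 + (j + 2) : Nat) : Int) ≠ -1)),
        if_neg (by push_cast; omega : ¬ (((k + 1 + j : Nat) : Int) = -1))]
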